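-- pv_equiv track=rewrite | github.com/pypi-data/pypi-mirror-348 | packages/theory-of-computation/theory_of_computation-1.0.0.tar.gz/theory_of_computation-1.0.0/theory_of_computation/dfa.py | dfa_substring_101
-- ===== SOURCE A (Python) =====
-- def dfa_substring_101(input_string):
--     """
--     A DFA that accepts binary strings containing the substring '101'.
--     Input:
--         input_string: The binary string.
--
--     Returns:
--         "Accepted" if the string contains '101', "Rejected" if no.
--
--     """
--     for bit in input_string:
--         if bit not in ('0', '1'):
--             return None  # for invalid input
--
--     current_state = "q0"
--
--     for char in input_string:
--         if current_state == "q0":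
--             if char == '0':
--                 current_state = "q0"
--             elif char == '1':
--                 current_state = "q1"
--
--         elif current_state == "q1":
--             if char == '0':
--                 current_state = "q2"
--             elif char == '1':
--                 current_state = "q1"
--
--         elif current_state == "q2":
--             if char == '0':
--                 current_state = "q0"
--             elif char == '1':
--                 current_state = "q3"
--
--         elif current_state == "q3":
--             if char in ('0', '1'):
--                 current_state = "q3"
--
--     if current_state == "q3":
--         return "Accepted"
--     else:
--         return "Rejected"
-- ===== SOURCE B (Python) =====
-- def dfa_substring_101(input_string):
--     # Validate element-by-element (tolerates non-string iterables like A),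
--     # then replace the DFA state loop with Python's built-in substring search.
--     chars = []
--     for bit in input_string:
--         if bit not in ('0', '1'):
--             return None
--         chars.append(bit)
--     return "Accepted" if '101' in ''.join(chars) else "Rejected"
-- ===== Notes on version B (the rewrite author's own statement) =====
-- stated objective: idiomatic
-- what changed: The explicit four-state DFA loop is replaced by a single built-in substring test '101' in s (after the same element-wise validation pass).
import Mathlib
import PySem

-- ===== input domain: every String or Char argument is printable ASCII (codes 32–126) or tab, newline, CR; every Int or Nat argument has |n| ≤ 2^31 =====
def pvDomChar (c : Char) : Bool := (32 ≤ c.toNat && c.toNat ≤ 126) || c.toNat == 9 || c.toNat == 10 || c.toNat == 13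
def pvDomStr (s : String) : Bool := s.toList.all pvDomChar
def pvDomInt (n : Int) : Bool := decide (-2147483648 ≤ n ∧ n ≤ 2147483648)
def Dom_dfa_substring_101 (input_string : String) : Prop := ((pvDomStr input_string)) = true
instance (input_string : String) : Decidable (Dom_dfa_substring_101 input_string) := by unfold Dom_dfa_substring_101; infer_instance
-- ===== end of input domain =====

-- B replaces A's explicit four-state DFA loop with a single built-in substring test ('101' in s); idiomatic, same cost.


-- ===== PORT A =====
-- one transition of A's inner loop (same branch order)
def pvStepA (current_state : String) (char : Char) : String :=
  if current_state = "q0" then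
    (if char = '0' then "q0" else if char = '1' then "q1" else current_state)
  else if current_state = "q1" then
    (if char = '0' then "q2" else if char = '1' then "q1" else current_state)
  else if current_state = "q2" then
    (if char = '0' then "q0" else if char = '1' then "q3" else current_state)
  else if current_state = "q3" then
    (if char = '0' ∨ char = '1' then "q3" else current_state)
  else current_state

def dfa_substring_101 (input_string : String) : Option String :=
  -- first pass: 'for bit in input_string: if bit not in ('0','1'): return None'
  if input_string.toList.all (fun bit => bit == '0' || bit == '1') then
    -- second pass: the state loop from current_state = "q0"
    let final := input_string.toList.foldl pvStepA "q0"
    if final = "q3" then some "Accepted" else some "Rejected"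
  else none

-- ===== PORT B =====
def dfa_substring_101_alt (input_string : String) : Option String :=
  -- same validation pass, then '101' in the validated string
  if input_string.toList.all (fun bit => bit == '0' || bit == '1') then
    if PySem.Str.isIn "101" input_string then some "Accepted" else some "Rejected"
  else none

-- ===== PRECONDITION & SPEC =====
def Spec_dfa_substring_101 (input_string : String) (out : Option String) : Prop := out = dfa_substring_101_alt input_string
instance (input_string : String) (out : Option String) : Decidable (Spec_dfa_substring_101 input_string out) := by unfold Spec_dfa_substring_101; infer_instance

-- ===== CLAIM (what is proved, stated in full; the proofs are below) =====
def Claim_equal_dfa_substring_101 : Prop := ∀ (input_string : String), Dom_dfa_substring_101 input_string → Spec_dfa_substring_101 input_string (dfa_substring_101 input_string)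

-- ===== LEMMAS AND PROOFS =====

-- closed-form description of A's state after reading l (valid binary chars)
def pvStateOf (l : List Char) : String :=
  if ['1','0','1'] <:+: l then "q3"
  else if ['1','0'] <:+ l then "q2"
  else if ['1'] <:+ l then "q1"
  else "q0"

theorem pv_suffix_concat {a : List Char} {x c : Char} {l : List Char} :
    a ++ [x] <:+ l ++ [c] ↔ x = c ∧ a <:+ l := by
  constructor
  · rintro ⟨t, ht⟩
    have h : (t ++ a) ++ [x] = l ++ [c] := by simpa [List.append_assoc] using ht
    have h1 : t ++ a = l ∧ x = c := by
      constructor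
      · have := congrArg List.dropLast h; simpa using this
      · have := congrArg List.getLast? h; simpa using this
    exact ⟨h1.2, t, h1.1⟩
  · rintro ⟨rfl, t, ht⟩
    exact ⟨t, by simp [← ht, List.append_assoc]⟩

theorem pv_infix_concat {sub l : List Char} {c : Char} :
    sub <:+: l ++ [c] ↔ sub <:+: l ∨ sub <:+ l ++ [c] := by
  constructor
  · rintro ⟨s, t, ht⟩
    rcases List.eq_nil_or_concat t with rfl | ⟨t', c', rfl⟩
    · right; exact ⟨s, by simpa using ht⟩
    · left
      have h : (s ++ sub ++ t') ++ [c'] = l ++ [c] := by simpa [List.append_assoc] using ht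
      have : s ++ sub ++ t' = l := by
        have := congrArg List.dropLast h; simpa using this
      exact ⟨s, t', this⟩
  · rintro (h | h)
    · exact h.trans (List.infix_append [] l [c])
    · exact h.isInfix

theorem pv_last {a : List Char} {x : Char} {l : List Char} (h : a ++ [x] <:+ l) :
    l.getLast? = some x := by
  obtain ⟨t, rfl⟩ := h; simp

theorem pv_run_eq_stateOf (l : List Char)
    (hv : ∀ c ∈ l, c = '0' ∨ c = '1') :
    l.foldl pvStepA "q0" = pvStateOf l := by
  induction l using List.reverseRecOn with
  | nil => simp [pvStateOf]
  | append_singleton l c ih =>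
    have hvl : ∀ x ∈ l, x = '0' ∨ x = '1' := fun x hx => hv x (by simp [hx])
    have hc : c = '0' ∨ c = '1' := hv c (by simp)
    rw [List.foldl_append, List.foldl_cons, List.foldl_nil, ih hvl]
    have hsuf1 : (['1'] <:+ l ++ [c]) ↔ c = '1' := by
      have h := @pv_suffix_concat [] '1' c l
      exact ⟨fun hh => ((h.mp hh).1).symm, fun hh => h.mpr ⟨hh.symm, List.nil_suffix⟩⟩
    have hsuf10 : (['1','0'] <:+ l ++ [c]) ↔ c = '0' ∧ ['1'] <:+ l := by
      have h := @pv_suffix_concat ['1'] '0' c l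
      exact ⟨fun hh => ⟨((h.mp hh).1).symm, (h.mp hh).2⟩, fun hh => h.mpr ⟨hh.1.symm, hh.2⟩⟩
    have hsuf101 : (['1','0','1'] <:+ l ++ [c]) ↔ c = '1' ∧ ['1','0'] <:+ l := by
      have h := @pv_suffix_concat ['1','0'] '1' c l
      exact ⟨fun hh => ⟨((h.mp hh).1).symm, (h.mp hh).2⟩, fun hh => h.mpr ⟨hh.1.symm, hh.2⟩⟩
    have hinf : (['1','0','1'] <:+: l ++ [c]) ↔ ['1','0','1'] <:+: l ∨ (c = '1' ∧ ['1','0'] <:+ l) := by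
      rw [pv_infix_concat, hsuf101]
    unfold pvStateOf
    by_cases h3 : ['1','0','1'] <:+: l
    · simp [h3, hinf, pvStepA]
    · by_cases h2 : ['1','0'] <:+ l
      · have hlast : l.getLast? = some '0' := pv_last (a := ['1']) h2
        have hn1 : ¬ (['1'] <:+ l) := by
          intro hh
          have h' := pv_last (a := ([] : List Char)) (x := '1') hh
          rw [hlast] at h'
          exact absurd h' (by decide)
        simp only [h3, if_false, h2, if_true]
        rcases hc with rfl | rfl
        · have hn101 : ¬ (['1','0','1'] <:+: l ++ ['0']) := by
            rw [hinf]; rintro (h | ⟨h, -⟩); exact h3 h; exact absurd h (by decide)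
          simp [hn101, hsuf10, hsuf1, hn1, pvStepA]
        · simp [hinf, h2, pvStepA]
      · by_cases h1 : ['1'] <:+ l
        · simp only [h3, if_false, h2, if_false, h1, if_true]
          rcases hc with rfl | rfl
          · have hn101 : ¬ (['1','0','1'] <:+: l ++ ['0']) := by
              rw [hinf]; rintro (h | ⟨h, -⟩); exact h3 h; exact absurd h (by decide)
            simp [hn101, hsuf10, h1, pvStepA]
          · have hn101 : ¬ (['1','0','1'] <:+: l ++ ['1']) := by
              rw [hinf]; rintro (h | ⟨-, h⟩); exact h3 h; exact h2 h
            simp [hn101, hsuf10, hsuf1, pvStepA]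
        · simp only [h3, if_false, h2, if_false, h1, if_false]
          rcases hc with rfl | rfl
          · have hn101 : ¬ (['1','0','1'] <:+: l ++ ['0']) := by
              rw [hinf]; rintro (h | ⟨h, -⟩); exact h3 h; exact absurd h (by decide)
            simp [hn101, hsuf10, hsuf1, h1, pvStepA]
          · have hn101 : ¬ (['1','0','1'] <:+: l ++ ['1']) := by
              rw [hinf]; rintro (h | ⟨-, h⟩); exact h3 h; exact h2 h
            simp [hn101, hsuf10, hsuf1, pvStepA]

-- ===== VERDICT (by name: the statement is the Claim_ definition above) =====
theorem dfa_substring_101_spec : Claim_equal_dfa_substring_101 := by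
  intro s _
  unfold Spec_dfa_substring_101 dfa_substring_101 dfa_substring_101_alt
  by_cases hv : s.toList.all (fun bit => bit == '0' || bit == '1')
  · have hv' : ∀ c ∈ s.toList, c = '0' ∨ c = '1' := by
      intro c hc
      have := List.all_eq_true.mp hv c hc
      simpa using this
    simp only [hv, if_true]
    rw [pv_run_eq_stateOf s.toList hv']
    by_cases h3 : ['1','0','1'] <:+: s.toList
    · have hinC : PySem.Chars.isIn ['1','0','1'] s.toList = true := by
        rw [PySem.Chars.isIn_iff_infix]; exact h3
      have hs : PySem.Str.isIn "101" s = true := by simp [hinC]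
      unfold pvStateOf
      rw [if_pos h3, hs]
      simp
    · have hinC : PySem.Chars.isIn ['1','0','1'] s.toList = false := by
        cases hI : PySem.Chars.isIn ['1','0','1'] s.toList
        · rfl
        · exact absurd (by rw [← PySem.Chars.isIn_iff_infix]; exact hI) h3
      have hs : PySem.Str.isIn "101" s = false := by simp [hinC]
      unfold pvStateOf
      rw [if_neg h3, hs]
      split_ifs <;> simp_all
  · simp [hv]
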